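-- pv_equiv track=rewrite | github.com/shepkeira/Document-Feature-Space | main.py | deal_with_pairs
-- ===== SOURCE A (Python) =====
-- VOWELS = ['a', 'e', 'i', 'o', 'u']
--
-- def deal_with_pairs(word):
--     last_char = 0
--     word_length = len(word)
--     for curr_char in range(1, word_length):
--         if word[last_char] in VOWELS and word[curr_char] in VOWELS:
--             #pair of VOWELS
--             word = word[:curr_char] + 'z' + word[(curr_char+1):] #adding consonant to keep length the same
--
--         last_char = curr_char
--     return word
-- ===== SOURCE B (Python) =====
-- VOWELS = ['a', 'e', 'i', 'o', 'u']
--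
-- def deal_with_pairs(word):
--     # one pass: track whether the previous (already-emitted) char is a vowel
--     out = []
--     prev_vowel = False
--     for ch in word:
--         if prev_vowel and ch in VOWELS:
--             out.append('z')
--             prev_vowel = False
--         else:
--             out.append(ch)
--             prev_vowel = ch in VOWELS
--     return ''.join(out)
-- ===== Notes on version B (the rewrite author's own statement) =====
-- stated objective: faster
-- what changed: Replaced A's index loop that rebuilds the whole string by slicing at every vowel pair with a single left-to-right pass that tracks whether the previously emitted character is a vowel and appends each output character once.
import Mathlib
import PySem

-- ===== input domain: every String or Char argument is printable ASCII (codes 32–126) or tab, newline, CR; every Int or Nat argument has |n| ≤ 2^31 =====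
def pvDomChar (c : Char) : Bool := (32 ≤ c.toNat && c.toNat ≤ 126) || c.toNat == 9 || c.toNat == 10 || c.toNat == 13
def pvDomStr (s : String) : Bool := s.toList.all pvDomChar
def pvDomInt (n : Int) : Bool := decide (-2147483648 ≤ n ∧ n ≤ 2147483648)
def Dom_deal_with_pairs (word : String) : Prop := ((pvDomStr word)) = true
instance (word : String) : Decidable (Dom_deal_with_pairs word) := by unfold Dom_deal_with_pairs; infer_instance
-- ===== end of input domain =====

-- B replaces A's repeated string slicing inside an index loop by a single pass that
-- tracks whether the previous emitted character is a vowel (objective: faster).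

-- ===== PORT A =====
def pvVOWELS : List Char := ['a', 'e', 'i', 'o', 'u']

-- A's loop: state (last_char, word); word rebuilt by slicing when a vowel pair is found.
def pvStepA (st : Int × List Char) (curr : Int) : Int × List Char :=
  let w := st.2
  let w' :=
    if PySem.List.pyGetD w st.1 ' ' ∈ pvVOWELS ∧ PySem.List.pyGetD w curr ' ' ∈ pvVOWELS then
      PySem.List.slice w none (some curr) ++ 'z' :: PySem.List.slice w (some (curr + 1)) none
    else w
  (curr, w')

def deal_with_pairs (word : String) : String :=
  let n : Int := PySem.Str.len word
  String.ofList ((PySem.List.pyRange 1 n 1).foldl pvStepA (0, word.toList)).2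

-- ===== PORT B =====
-- B's single pass: prev = "previous emitted char is a vowel".
def pvGoB (prev : Bool) : List Char → List Char
  | [] => []
  | c :: rest =>
    if prev && decide (c ∈ pvVOWELS) then 'z' :: pvGoB false rest
    else c :: pvGoB (decide (c ∈ pvVOWELS)) rest

def deal_with_pairs_alt (word : String) : String :=
  String.ofList (pvGoB false word.toList)

-- ===== PRECONDITION & SPEC =====
def Spec_deal_with_pairs (word : String) (out : String) : Prop := out = deal_with_pairs_alt word
instance (word : String) (out : String) : Decidable (Spec_deal_with_pairs word out) := by unfold Spec_deal_with_pairs; infer_instance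

-- ===== CLAIM (what is proved, stated in full; the proofs are below) =====
def Claim_equal_deal_with_pairs : Prop := ∀ (word : String), Dom_deal_with_pairs word → Spec_deal_with_pairs word (deal_with_pairs word)

-- ===== LEMMAS AND PROOFS =====

-- A's loop invariant: with the word split as done ++ c :: rest (c at index done.length,
-- the loop about to process indices done.length+1 …), the remaining iterations rewrite
-- exactly the suffix rest the way B's pass does with prev = (c ∈ vowels).
theorem pvLoopA_eq (rest : List Char) : ∀ (done : List Char) (c : Char),
    (PySem.List.pyRange ((done.length : Int) + 1) ((done.length : Int) + 1 + rest.length) 1).foldl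
      pvStepA ((done.length : Int), done ++ c :: rest)
    = (((done.length : Int) + rest.length),
        done ++ c :: pvGoB (decide (c ∈ pvVOWELS)) rest) := by
  induction rest with
  | nil =>
    intro done c
    rw [PySem.List.pyRange_one_eq_nil (by simp)]
    simp [pvGoB]
  | cons d rest ih =>
    intro done c
    have hk : (done.length : Int) + 1 < (done.length : Int) + 1 + (d :: rest).length := by
      simp only [List.length_cons]; push_cast; omega
    rw [PySem.List.pyRange_one_cons hk]
    simp only [List.foldl_cons]
    have hget_c : PySem.List.pyGetD (done ++ c :: d :: rest) ((done.length : Int)) ' ' = c := by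
      rw [PySem.List.pyGetD_natCast]
      simp
    have hget_d : PySem.List.pyGetD (done ++ c :: d :: rest) ((done.length : Int) + 1) ' ' = d := by
      have : ((done.length : Int) + 1) = ((done.length + 1 : Nat) : Int) := by push_cast; ring
      rw [this, PySem.List.pyGetD_natCast]
      simp
    by_cases hc : c ∈ pvVOWELS ∧ d ∈ pvVOWELS
    · -- vowel pair: index done.length+1 is overwritten with 'z'
      have hslice1 : PySem.List.slice (done ++ c :: d :: rest) none (some ((done.length : Int) + 1))
          = done ++ [c] := by
        have h1 : (0:Int) ≤ (done.length : Int) + 1 := by positivity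
        rw [PySem.List.slice_to _ h1]
        have : ((done.length : Int) + 1).toNat = done.length + 1 := by omega
        rw [this]
        simp [List.take_append]
      have hslice2 : PySem.List.slice (done ++ c :: d :: rest) (some ((done.length : Int) + 1 + 1)) none
          = rest := by
        have h1 : (0:Int) ≤ (done.length : Int) + 1 + 1 := by positivity
        rw [PySem.List.slice_from _ h1]
        have : ((done.length : Int) + 1 + 1).toNat = done.length + 2 := by omega
        rw [this]
        simp [List.drop_append]
      have hstep : pvStepA ((done.length : Int), done ++ c :: d :: rest) ((done.length : Int) + 1)
          = ((done.length : Int) + 1, (done ++ [c]) ++ 'z' :: rest) := by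
        simp only [pvStepA, hget_c, hget_d, if_pos hc, hslice1, hslice2]
      rw [hstep]
      have hlen : ((done ++ [c]).length : Int) = (done.length : Int) + 1 := by simp
      have := ih (done ++ [c]) 'z'
      rw [hlen] at this
      have hrange : (PySem.List.pyRange ((done.length : Int) + 1 + 1)
            ((done.length : Int) + 1 + ((d :: rest).length : Int)) 1)
          = (PySem.List.pyRange ((done.length : Int) + 1 + 1)
            ((done.length : Int) + 1 + 1 + (rest.length : Int)) 1) := by
        congr 1
        simp; ring
      rw [hrange, this]
      have hz : decide ('z' ∈ pvVOWELS) = false := by decide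
      have hcd : decide (c ∈ pvVOWELS) = true := by simp [hc.1]
      have hdd : decide (d ∈ pvVOWELS) = true := by simp [hc.2]
      simp only [pvGoB, hz, hcd, hdd, Bool.true_and, if_pos, Prod.mk.injEq]
      refine ⟨?_, ?_⟩
      · simp only [List.length_cons]; push_cast; ring
      · simp [List.append_assoc]
    · -- no pair at this index: word unchanged
      have hstep : pvStepA ((done.length : Int), done ++ c :: d :: rest) ((done.length : Int) + 1)
          = ((done.length : Int) + 1, (done ++ [c]) ++ d :: rest) := by
        simp only [pvStepA, hget_c, hget_d, if_neg hc]
        simp [List.append_assoc]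
      rw [hstep]
      have hlen : ((done ++ [c]).length : Int) = (done.length : Int) + 1 := by simp
      have := ih (done ++ [c]) d
      rw [hlen] at this
      have hrange : (PySem.List.pyRange ((done.length : Int) + 1 + 1)
            ((done.length : Int) + 1 + ((d :: rest).length : Int)) 1)
          = (PySem.List.pyRange ((done.length : Int) + 1 + 1)
            ((done.length : Int) + 1 + 1 + (rest.length : Int)) 1) := by
        congr 1
        simp; ring
      rw [hrange, this]
      simp only [Prod.mk.injEq]
      have hcond : (decide (c ∈ pvVOWELS) && decide (d ∈ pvVOWELS)) = false := by
        rcases (not_and_or.mp hc) with h | h <;> simp [h]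
      refine ⟨?_, ?_⟩
      · simp only [List.length_cons]; push_cast; ring
      · conv_rhs => rw [pvGoB]
        rw [if_neg (by simp [hcond])]
        simp [List.append_assoc]

-- ===== VERDICT (by name: the statement is the Claim_ definition above) =====
theorem deal_with_pairs_spec : Claim_equal_deal_with_pairs := by
  intro word _
  unfold Spec_deal_with_pairs deal_with_pairs deal_with_pairs_alt
  cases hw : word.toList with
  | nil =>
    simp [PySem.Str.len_eq, hw, PySem.List.pyRange_one_eq_nil, pvGoB]
  | cons c rest =>
    have hlen : (PySem.Str.len word : Int) = (1 : Int) + rest.length := by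
      simp [PySem.Str.len_eq, hw]; omega
    have h0 := pvLoopA_eq rest [] c
    simp only [List.length_nil, Nat.cast_zero, List.nil_append, zero_add] at h0
    simp only [hlen, h0]
    rw [pvGoB, if_neg (by simp)]
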